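-- pv_equiv track=rewrite | github.com/Revi1337/BaekJoon-Coding-Test | 백준/Silver/1652. 누울 자리를 찾아라/누울 자리를 찾아라.py | solution
-- ===== SOURCE A (Python) =====
-- def solution(N, rooms):
--     answer = [0, 0]
--     for row in range(N):
--         counter = 0
--         for col in range(N):
--             if rooms[row][col] != 'X':
--                 counter += 1
--             else:
--                 if counter >= 2:
--                     answer[0] += 1
--                 counter = 0
--         if counter >= 2:
--             answer[0] += 1
--
--     for col in range(N):
--         ver = [row[col] for row in rooms]
--         counter = 0
--         for val in ver:
--             if val != 'X':
--                 counter += 1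
--             else:
--                 if counter >= 2:
--                     answer[1] += 1
--                 counter = 0
--         if counter >= 2:
--             answer[1] += 1
--
--     return f'{answer[0]} {answer[1]}'
-- ===== SOURCE B (Python) =====
-- def solution(N, rooms):
--     if N <= 0:
--         return '0 0'
--     h = sum(1 for row in rooms[:N]
--               for seg in row[:N].split('X') if len(seg) >= 2)
--     v = sum(1 for c in range(N)
--               for seg in ''.join(row[c] for row in rooms).split('X') if len(seg) >= 2)
--     return f'{h} {v}'
-- ===== Notes on version B (the rewrite author's own statement) =====
-- stated objective: idiomatic
-- what changed: A's running-counter scans with end-of-line flush are replaced by materializing each row/column string, splitting it on 'X' and counting the segments of length >= 2.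
import Mathlib
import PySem

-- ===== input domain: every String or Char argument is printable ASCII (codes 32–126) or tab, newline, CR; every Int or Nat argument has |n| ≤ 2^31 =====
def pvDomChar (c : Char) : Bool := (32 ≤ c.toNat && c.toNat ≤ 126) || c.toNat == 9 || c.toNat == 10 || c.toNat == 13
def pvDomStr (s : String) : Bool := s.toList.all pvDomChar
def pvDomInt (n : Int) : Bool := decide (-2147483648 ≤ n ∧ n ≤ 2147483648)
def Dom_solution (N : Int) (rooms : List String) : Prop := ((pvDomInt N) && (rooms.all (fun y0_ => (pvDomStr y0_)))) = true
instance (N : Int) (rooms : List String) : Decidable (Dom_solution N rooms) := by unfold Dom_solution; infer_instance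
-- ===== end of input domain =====

-- B replaces A's running-counter scans by materializing each row/column string,
-- splitting on 'X' and counting the segments of length ≥ 2 (objective: idiomatic).

-- ===== PORT A =====
-- one inner-loop step of A's counter scan (state = (answer component, counter))
def pvStepA (p : Int × Int) (val : Char) : Int × Int :=
  if val ≠ 'X' then (p.1, p.2 + 1)
  else if 2 ≤ p.2 then (p.1 + 1, 0) else (p.1, 0)

-- end-of-line check A performs after each scan
def pvFinish (p : Int × Int) : Int := if 2 ≤ p.2 then p.1 + 1 else p.1

-- A's inner horizontal loop over 'for col in range(N)' on one row
def pvRowScanA (N : Int) (s : List Char) (a : Int) : Int :=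
  pvFinish ((PySem.List.pyRange 0 N 1).foldl
    (fun q col => pvStepA q (PySem.List.pyGetD s col 'X')) (a, 0))

-- A's inner vertical loop: 'ver = [row[col] for row in rooms]' then 'for val in ver'
def pvColScanA (rooms : List String) (col : Int) (a : Int) : Int :=
  pvFinish ((rooms.map (fun row => PySem.List.pyGetD row.toList col 'X')).foldl pvStepA (a, 0))

def solution (N : Int) (rooms : List String) : String :=
  let a0 : Int := (PySem.List.pyRange 0 N 1).foldl
    (fun a row => pvRowScanA N (PySem.List.pyGetD rooms row "").toList a) 0
  let a1 : Int := (PySem.List.pyRange 0 N 1).foldl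
    (fun a col => pvColScanA rooms col a) 0
  PySem.Str.join " " [PySem.Int.toStr a0, PySem.Int.toStr a1]

-- ===== PORT B =====
-- number of segments of length ≥ 2 after splitting on 'X'  (the '.split('X')' + count step of Source B)
def pvSegCount (s : List Char) : Int :=
  ((PySem.Chars.splitOn s ['X']).countP (fun seg => 2 ≤ seg.length) : Int)

def solution_alt (N : Int) (rooms : List String) : String :=
  if N ≤ 0 then "0 0"
  else
    let h : Int :=
      (((PySem.List.slice rooms none (some N)).map
        (fun row => pvSegCount (PySem.List.slice row.toList none (some N)))).sum)
    let v : Int :=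
      (((PySem.List.pyRange 0 N 1).map
        (fun c => pvSegCount (rooms.map (fun row => PySem.List.pyGetD row.toList c 'X')))).sum)
    PySem.Str.join " " [PySem.Int.toStr h, PySem.Int.toStr v]

-- ===== PRECONDITION & SPEC =====
-- Pre_ excludes exactly the inputs on which A raises IndexError (some row shorter
-- than N, or fewer than N rows); it admits every input on which A returns.
def Pre_solution (N : Int) (rooms : List String) : Prop :=
  N ≤ rooms.length ∧ ∀ r ∈ rooms, N ≤ r.toList.length
instance (N : Int) (rooms : List String) : Decidable (Pre_solution N rooms) := by
  unfold Pre_solution; infer_instance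
def pvWitness_solution : Int × List String := (2, ["..", "X."])

def Spec_solution (N : Int) (rooms : List String) (out : String) : Prop := out = solution_alt N rooms
instance (N : Int) (rooms : List String) (out : String) : Decidable (Spec_solution N rooms out) := by unfold Spec_solution; infer_instance

-- ===== CLAIM (what is proved, stated in full; the proofs are below) =====
def Claim_equal_solution : Prop := ∀ (N : Int) (rooms : List String), Dom_solution N rooms → Pre_solution N rooms → Spec_solution N rooms (solution N rooms)

-- ===== LEMMAS AND PROOFS =====

-- spec-level recursive split on 'X'
def pvSplitX : List Char → List (List Char)
  | [] => [[]]
  | c :: rest =>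
    if c = 'X' then [] :: pvSplitX rest
    else
      match pvSplitX rest with
      | r :: rs => (c :: r) :: rs
      | [] => [[c]]

theorem pvSplitX_ne_nil (s : List Char) : pvSplitX s ≠ [] := by
  induction s with
  | nil => simp [pvSplitX]
  | cons c rest ih =>
    simp only [pvSplitX]
    split
    · simp
    · cases h : pvSplitX rest <;> simp

theorem splitOn_go_eq (s : List Char) :
    ∀ (fuel : Nat) (cur : List Char) (acc : List (List Char)), s.length < fuel →
      PySem.Chars.splitOn.go ['X'] fuel s cur acc =
        acc.reverse ++
          (match pvSplitX s with
           | r :: rs => (cur.reverse ++ r) :: rs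
           | [] => [cur.reverse]) := by
  induction s with
  | nil =>
    intro fuel cur acc h
    match fuel with
    | fuel + 1 => simp [PySem.Chars.splitOn.go, pvSplitX]
  | cons c rest ih =>
    intro fuel cur acc h
    match fuel with
    | fuel + 1 =>
      by_cases hc : c = 'X'
      · have hpre : List.isPrefixOf ['X'] (c :: rest) = true := by
          simp [List.isPrefixOf, hc]
        rw [PySem.Chars.splitOn.go, if_pos hpre]
        simp only [List.length_cons] at h
        simp only [List.length_cons, List.length_nil, List.drop_succ_cons, List.drop_zero]
        rw [ih fuel [] (cur.reverse :: acc) (by omega)]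
        rcases hr : pvSplitX rest with _ | ⟨r, rs⟩
        · exact absurd hr (pvSplitX_ne_nil rest)
        · simp [pvSplitX, hc, hr]
      · have hpre : List.isPrefixOf ['X'] (c :: rest) = false := by
          simp [List.isPrefixOf]; exact fun h => absurd h.symm hc
        rw [PySem.Chars.splitOn.go, if_neg (by simp [hpre])]
        simp only [List.length_cons] at h
        rw [ih fuel (c :: cur) acc (by omega)]
        rcases hr : pvSplitX rest with _ | ⟨r, rs⟩
        · exact absurd hr (pvSplitX_ne_nil rest)
        · simp [pvSplitX, hc, hr]

theorem splitOn_eq_splitX (s : List Char) : PySem.Chars.splitOn s ['X'] = pvSplitX s := by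
  rw [PySem.Chars.splitOn, splitOn_go_eq s (s.length + 1) [] [] (by omega)]
  rcases hr : pvSplitX s with _ | ⟨r, rs⟩
  · exact absurd hr (pvSplitX_ne_nil s)
  · simp

-- A's scan with a nonnegative running counter, expressed through pvSplitX
theorem scan_eq_split (s : List Char) :
    ∀ (a : Int) (c : Nat),
      pvFinish (s.foldl pvStepA (a, (c : Int))) =
        a + (match pvSplitX s with
             | r :: rs =>
               (if 2 ≤ c + r.length then (1 : Int) else 0) +
                 (rs.countP (fun seg => 2 ≤ seg.length) : Int)
             | [] => 0) := by
  induction s with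
  | nil =>
    intro a c
    simp only [List.foldl_nil, pvSplitX, pvFinish, List.countP_nil, List.length_nil,
      Nat.cast_zero, add_zero]
    split_ifs with h1 h2 h2 <;> push_cast at * <;> linarith
  | cons x rest ih =>
    intro a c
    by_cases hx : x = 'X'
    · have hstep : pvStepA (a, (c : Int)) x =
          ((if 2 ≤ (c : Int) then a + 1 else a), ((0 : Nat) : Int)) := by
        simp only [pvStepA, hx, ne_eq, not_true_eq_false, if_false, Nat.cast_zero]
        split_ifs <;> rfl
      simp only [List.foldl_cons, hstep, ih]
      rcases hr : pvSplitX rest with _ | ⟨r, rs⟩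
      · exact absurd hr (pvSplitX_ne_nil rest)
      · simp [pvSplitX, hx, hr, List.countP_cons]
        split_ifs
        all_goals try simp only [decide_eq_true_eq, Nat.zero_add, List.length_nil, Nat.add_zero] at *
        all_goals try push_cast at *
        all_goals linarith
    · have hstep : pvStepA (a, (c : Int)) x = (a, ((c + 1 : Nat) : Int)) := by
        simp [pvStepA, hx, Nat.cast_add, Nat.cast_one]
      simp only [List.foldl_cons, hstep, ih]
      rcases hr : pvSplitX rest with _ | ⟨r, rs⟩
      · exact absurd hr (pvSplitX_ne_nil rest)
      · simp [pvSplitX, hx, hr]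
        split_ifs
        all_goals try simp only [decide_eq_true_eq, Nat.zero_add, List.length_nil, Nat.add_zero] at *
        all_goals try push_cast at *
        all_goals linarith

-- A's per-line counter scan (started at counter 0) counts exactly B's split segments
theorem scanA_eq_segCount (s : List Char) (a : Int) :
    pvFinish (s.foldl pvStepA (a, 0)) = a + pvSegCount s := by
  have h := scan_eq_split s a 0
  rw [pvSegCount, splitOn_eq_splitX]
  rcases hr : pvSplitX s with _ | ⟨r, rs⟩
  · exact absurd hr (pvSplitX_ne_nil s)
  · simp only [hr, Nat.cast_zero] at h
    simp only [h, List.countP_cons]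
    split_ifs
    all_goals try simp only [decide_eq_true_eq, Nat.zero_add, List.length_nil, Nat.add_zero] at *
    all_goals try push_cast at *
    all_goals linarith

-- fold over range(N) indexing xs = fold over xs[:N]  (N within bounds)
theorem foldl_pyRange_take {α β : Type} (xs : List α) (d : α) (N : Int) (hN : 0 ≤ N)
    (hlen : N ≤ xs.length) (f : β → α → β) (init : β) :
    (PySem.List.pyRange 0 N 1).foldl (fun acc j => f acc (PySem.List.pyGetD xs j d)) init =
      (xs.take N.toNat).foldl f init := by
  have hlen' : ((xs.take N.toNat).length : Int) = N := by
    simp [List.length_take]; omega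
  have hfun : (PySem.List.pyRange 0 N 1).foldl
        (fun acc j => f acc (PySem.List.pyGetD xs j d)) init =
      (PySem.List.pyRange 0 N 1).foldl
        (fun acc j => f acc (PySem.List.pyGetD (xs.take N.toNat) j d)) init := by
    apply PySem.List.foldl_congr_mem
    intro acc col hcol
    have hmem := (PySem.List.mem_pyRange_one).1 hcol
    have hlt : col.toNat < N.toNat := by omega
    rw [PySem.List.pyGetD_of_nonneg _ _ hmem.1, PySem.List.pyGetD_of_nonneg _ _ hmem.1]
    rw [List.getD_eq_getElem?_getD, List.getD_eq_getElem?_getD]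
    rw [List.getElem?_take]
    simp [hlt]
  rw [hfun,
    show PySem.List.pyRange 0 N 1 =
        PySem.List.pyRange 0 ((xs.take N.toNat).length : Int) 1 from by rw [hlen']]
  exact PySem.List.foldl_pyRange_zero_pyGetD' (xs.take N.toNat) d f init

-- A's horizontal row scan, for a row long enough, equals B's split count on row[:N]
theorem rowScanA_eq (N : Int) (s : List Char) (hN : 0 ≤ N) (h : N ≤ s.length) (a : Int) :
    pvRowScanA N s a = a + pvSegCount (s.take N.toNat) := by
  rw [pvRowScanA, foldl_pyRange_take s 'X' N hN h pvStepA (a, 0), scanA_eq_segCount]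

-- A's vertical column scan equals B's split count on the materialized column
theorem colScanA_eq (rooms : List String) (col : Int) (a : Int) :
    pvColScanA rooms col a =
      a + pvSegCount (rooms.map (fun row => PySem.List.pyGetD row.toList col 'X')) := by
  rw [pvColScanA, scanA_eq_segCount]

theorem solution_spec : Claim_equal_solution := by
  intro N rooms _hdom hpre
  obtain ⟨h1, h2⟩ := hpre
  unfold Spec_solution
  by_cases hN : N ≤ 0
  · simp only [solution, solution_alt, if_pos hN, PySem.List.pyRange_one_eq_nil hN,
      List.foldl_nil]
    decide
  · push_neg at hN
    have hN0 : 0 ≤ N := le_of_lt hN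
    simp only [solution, solution_alt, if_neg (not_le.mpr hN)]
    have hH : (PySem.List.pyRange 0 N 1).foldl
          (fun a row => pvRowScanA N (PySem.List.pyGetD rooms row "").toList a) 0 =
        ((PySem.List.slice rooms none (some N)).map
          (fun row => pvSegCount (PySem.List.slice row.toList none (some N)))).sum := by
      rw [PySem.List.foldl_congr_mem _ _
        (fun a row => a +
          pvSegCount (((PySem.List.pyGetD rooms row "").toList).take N.toNat)) 0 ?_]
      · rw [foldl_pyRange_take rooms "" N hN0 h1
          (fun a r => a + pvSegCount (r.toList.take N.toNat)) 0]
        rw [PySem.List.foldl_add, zero_add, PySem.List.slice_to _ hN0]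
        apply congrArg
        apply List.map_congr_left
        intro r _
        rw [PySem.List.slice_to _ hN0]
      · intro acc row hrow
        have hmem := (PySem.List.mem_pyRange_one).1 hrow
        have hrm : PySem.List.pyGetD rooms row "" ∈ rooms := by
          rw [PySem.List.pyGetD_of_nonneg _ _ hmem.1]
          have hlt : row.toNat < rooms.length := by omega
          rw [List.getD_eq_getElem?_getD, List.getElem?_eq_getElem hlt]
          exact Option.getD_some ▸ List.getElem_mem hlt
        exact rowScanA_eq N _ hN0 (h2 _ hrm) acc
    have hV : (PySem.List.pyRange 0 N 1).foldl (fun a col => pvColScanA rooms col a) 0 =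
        ((PySem.List.pyRange 0 N 1).map
          (fun c => pvSegCount
            (rooms.map (fun row => PySem.List.pyGetD row.toList c 'X')))).sum := by
      rw [PySem.List.foldl_congr_mem _ _
        (fun a col => a +
          pvSegCount (rooms.map (fun row => PySem.List.pyGetD row.toList col 'X'))) 0
        (fun acc col _ => colScanA_eq rooms col acc)]
      rw [PySem.List.foldl_add, zero_add]
    rw [hH, hV]
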